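-- pv_equiv track=rewrite | github.com/rykunk21/CSE231 | Labs/lab04.py | digit_count
-- ===== SOURCE A (Python) =====
-- def digit_count(s):
--     import math
--     evens, odds = '2468', '13579'
--     s = math.floor(s); s = str(s)
--     even_count, odd_count, zero_count = 0, 0, 0
--     for i, ch in enumerate(s):
--         if ch in evens:
--             even_count += 1
--         elif ch in odds:
--             odd_count += 1
--         elif ch == '0':
--             zero_count += 1
--     return even_count, odd_count, zero_count
-- ===== SOURCE B (Python) =====
-- def digit_count(s):
--     import math
--     n = abs(math.floor(s))
--     if n == 0:
--         return (0, 0, 1)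
--     even_count, odd_count, zero_count = 0, 0, 0
--     while n:
--         d = n % 10
--         if d == 0:
--             zero_count += 1
--         elif d % 2 == 0:
--             even_count += 1
--         else:
--             odd_count += 1
--         n //= 10
--     return even_count, odd_count, zero_count
-- ===== Notes on version B (the rewrite author's own statement) =====
-- stated objective: alternative
-- what changed: B extracts digits arithmetically (abs + repeated divmod by 10, zero special-cased) instead of converting the floored number to a string and scanning its characters against the literal strings '2468'/'13579'.
import Mathlib
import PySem

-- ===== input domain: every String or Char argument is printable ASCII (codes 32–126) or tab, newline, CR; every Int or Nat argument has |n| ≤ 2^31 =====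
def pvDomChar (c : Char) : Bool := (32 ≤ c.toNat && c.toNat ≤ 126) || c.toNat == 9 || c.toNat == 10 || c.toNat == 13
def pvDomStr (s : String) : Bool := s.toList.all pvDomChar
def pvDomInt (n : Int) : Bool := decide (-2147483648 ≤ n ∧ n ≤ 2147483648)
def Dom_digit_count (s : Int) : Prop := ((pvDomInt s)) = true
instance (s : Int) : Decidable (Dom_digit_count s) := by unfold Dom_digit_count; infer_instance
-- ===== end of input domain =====

-- B extracts digits arithmetically (abs + divmod-by-10 loop, 0 special-cased) instead of scanning str(floor(s)); alternative decomposition, same cost.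


-- ===== PORT A =====
-- math.floor(s) is the identity on an int argument; str(n) is PySem.Int.toChars;
-- `ch in evens` (single char in a string) is exactly char-list membership.
def digit_count (s : Int) : Int × Int × Int :=
  let evens : List Char := "2468".toList
  let odds : List Char := "13579".toList
  let chars : List Char := PySem.Int.toChars s
  (PySem.List.enumerate chars).foldl
    (fun (acc : Int × Int × Int) (p : Int × Char) =>
      if evens.contains p.2 then (acc.1 + 1, acc.2.1, acc.2.2)
      else if odds.contains p.2 then (acc.1, acc.2.1 + 1, acc.2.2)
      else if p.2 = '0' then (acc.1, acc.2.1, acc.2.2 + 1)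
      else acc)
    (0, 0, 0)

-- ===== PORT B =====
def dcLoop (n : Nat) (e o z : Int) : Int × Int × Int :=
  if h : n = 0 then (e, o, z)
  else
    let d := n % 10
    if d = 0 then dcLoop (n / 10) e o (z + 1)
    else if d % 2 = 0 then dcLoop (n / 10) (e + 1) o z
    else dcLoop (n / 10) e (o + 1) z
termination_by n
decreasing_by all_goals exact Nat.div_lt_self (Nat.pos_of_ne_zero h) (by norm_num)

def digit_count_alt (s : Int) : Int × Int × Int :=
  let n := s.natAbs
  if n = 0 then (0, 0, 1) else dcLoop n 0 0 0

-- ===== PRECONDITION & SPEC =====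
def Spec_digit_count (s : Int) (out : Int × Int × Int) : Prop := out = digit_count_alt s
instance (s : Int) (out : Int × Int × Int) : Decidable (Spec_digit_count s out) := by unfold Spec_digit_count; infer_instance

-- ===== CLAIM (what is proved, stated in full; the proofs are below) =====
def Claim_equal_digit_count : Prop := ∀ (s : Int), Dom_digit_count s → Spec_digit_count s (digit_count s)

-- ===== LEMMAS AND PROOFS =====

-- the three elif-ordered classifying predicates of A's loop body
def pvQ1 (c : Char) : Bool := ("2468".toList).contains c
def pvQ2 (c : Char) : Bool := !pvQ1 c && ("13579".toList).contains c
def pvQ3 (c : Char) : Bool := !pvQ1 c && !("13579".toList).contains c && (c = '0')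

theorem pv_classify (d : Nat) (h : d < 10) :
    pvQ1 (Nat.digitChar d) = decide (d ≠ 0 ∧ d % 2 = 0) ∧
    pvQ2 (Nat.digitChar d) = decide (d % 2 ≠ 0) ∧
    pvQ3 (Nat.digitChar d) = decide (d = 0) := by
  interval_cases d <;> exact ⟨rfl, rfl, rfl⟩

theorem pv_foldA (chars : List Char) : ∀ (e o z : Int),
    chars.foldl
      (fun (acc : Int × Int × Int) (c : Char) =>
        if ("2468".toList).contains c then (acc.1 + 1, acc.2.1, acc.2.2)
        else if ("13579".toList).contains c then (acc.1, acc.2.1 + 1, acc.2.2)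
        else if c = '0' then (acc.1, acc.2.1, acc.2.2 + 1)
        else acc)
      (e, o, z)
    = (e + chars.countP pvQ1, o + chars.countP pvQ2, z + chars.countP pvQ3) := by
  induction chars with
  | nil => intro e o z; simp
  | cons c cs ih =>
    intro e o z
    rw [List.foldl_cons, List.countP_cons, List.countP_cons, List.countP_cons]
    by_cases h1 : ("2468".toList).contains c = true
    · obtain ⟨q1, q2, q3⟩ : pvQ1 c = true ∧ pvQ2 c = false ∧ pvQ3 c = false := by
        have hl : "2468".toList = ['2','4','6','8'] := by decide
        rw [hl] at h1
        simp only [List.contains_eq_mem, List.mem_cons, List.not_mem_nil, or_false, decide_eq_true_eq] at h1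
        rcases h1 with h | h | h | h <;> (subst h; exact ⟨rfl, rfl, rfl⟩)
      rw [if_pos h1, ih, q1, q2, q3]
      simp
      omega
    · have hc1 : ("2468".toList).contains c = false := Bool.eq_false_iff.mpr h1
      rw [if_neg h1]
      by_cases h2 : ("13579".toList).contains c = true
      · obtain ⟨q1, q2, q3⟩ : pvQ1 c = false ∧ pvQ2 c = true ∧ pvQ3 c = false := by
          have hl : "13579".toList = ['1','3','5','7','9'] := by decide
          rw [hl] at h2
          simp only [List.contains_eq_mem, List.mem_cons, List.not_mem_nil, or_false, decide_eq_true_eq] at h2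
          rcases h2 with h | h | h | h | h <;> (subst h; exact ⟨rfl, rfl, rfl⟩)
        rw [if_pos h2, ih, q1, q2, q3]
        simp
        omega
      · have hc2 : ("13579".toList).contains c = false := Bool.eq_false_iff.mpr h2
        have q1 : pvQ1 c = false := hc1
        have q2 : pvQ2 c = false := by
          show (!pvQ1 c && ("13579".toList).contains c) = false
          rw [hc2, Bool.and_false]
        rw [if_neg h2]
        by_cases h3 : c = '0'
        · have q3 : pvQ3 c = true := by
            show (!pvQ1 c && !("13579".toList).contains c && decide (c = '0')) = true
            subst h3
            rfl
          rw [if_pos h3, ih, q1, q2, q3]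
          simp
          omega
        · have q3 : pvQ3 c = false := by
            show (!pvQ1 c && !("13579".toList).contains c && decide (c = '0')) = false
            rw [decide_eq_false h3, Bool.and_false]
          rw [if_neg h3, ih, q1, q2, q3]
          simp

-- the fold over `enumerate` ignores the index, so it equals the plain char fold
theorem pv_enum_fold (chars : List Char) : ∀ (i : Int) (acc : Int × Int × Int),
    (PySem.List.enumerate chars i).foldl
      (fun (acc : Int × Int × Int) (p : Int × Char) =>
        if ("2468".toList).contains p.2 then (acc.1 + 1, acc.2.1, acc.2.2)
        else if ("13579".toList).contains p.2 then (acc.1, acc.2.1 + 1, acc.2.2)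
        else if p.2 = '0' then (acc.1, acc.2.1, acc.2.2 + 1)
        else acc)
      acc
      = chars.foldl
      (fun (acc : Int × Int × Int) (c : Char) =>
        if ("2468".toList).contains c then (acc.1 + 1, acc.2.1, acc.2.2)
        else if ("13579".toList).contains c then (acc.1, acc.2.1 + 1, acc.2.2)
        else if c = '0' then (acc.1, acc.2.1, acc.2.2 + 1)
        else acc)
      acc := by
  induction chars with
  | nil => intro i acc; rw [PySem.List.enumerate_nil]; rfl
  | cons c cs ih =>
    intro i acc
    rw [PySem.List.enumerate_cons, List.foldl_cons, List.foldl_cons, ih]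

theorem pv_dcLoop_eq (n : Nat) : 1 ≤ n → ∀ (e o z : Int),
    dcLoop n e o z =
      (e + (Nat.toDigits 10 n).countP pvQ1,
       o + (Nat.toDigits 10 n).countP pvQ2,
       z + (Nat.toDigits 10 n).countP pvQ3) := by
  induction n using Nat.strong_induction_on with
  | _ n ih =>
    intro hn e o z
    have hn0 : n ≠ 0 := by omega
    by_cases hb : n < 10
    · rw [Nat.toDigits_of_lt_base hb]
      obtain ⟨c1, c2, c3⟩ := pv_classify n hb
      have hd : n % 10 = n := Nat.mod_eq_of_lt hb
      have h10 : n / 10 = 0 := Nat.div_eq_of_lt hb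
      rw [dcLoop, dif_neg hn0, hd, h10,
          List.countP_cons, List.countP_cons, List.countP_cons,
          List.countP_nil, c1, c2, c3, if_neg hn0]
      by_cases he : n % 2 = 0
      · rw [if_pos he]
        simp [dcLoop, hn0, he]
      · rw [if_neg he]
        simp [dcLoop, hn0, he]
    · push_neg at hb
      rw [Nat.toDigits_of_base_le (by norm_num) hb]
      have hd : n % 10 < 10 := Nat.mod_lt _ (by norm_num)
      obtain ⟨c1, c2, c3⟩ := pv_classify (n % 10) hd
      have hlt : n / 10 < n := Nat.div_lt_self (by omega) (by norm_num)
      have hge : 1 ≤ n / 10 := (Nat.one_le_div_iff (by norm_num)).mpr hb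
      rw [dcLoop, dif_neg hn0,
          List.countP_append, List.countP_append, List.countP_append,
          List.countP_cons, List.countP_cons, List.countP_cons,
          List.countP_nil, c1, c2, c3]
      by_cases hz : n % 10 = 0
      · rw [if_pos hz, ih _ hlt hge]
        simp [hz]
        omega
      · rw [if_neg hz]
        by_cases he : n % 10 % 2 = 0
        · rw [if_pos he, ih _ hlt hge]
          simp [hz, he]
          omega
        · rw [if_neg he, ih _ hlt hge]
          simp [hz, he]
          omega

-- ===== VERDICT (by name: the statement is the Claim_ definition above) =====
theorem digit_count_spec : Claim_equal_digit_count := by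
  intro s _
  show digit_count s = digit_count_alt s
  unfold digit_count digit_count_alt
  by_cases h0 : s.natAbs = 0
  · have : s = 0 := by omega
    subst this
    decide
  · simp only [h0, ite_false]
    rw [pv_enum_fold]
    by_cases hneg : s < 0
    · have hc : PySem.Int.toChars s = '-' :: Nat.toDigits 10 s.natAbs := by
        simp [PySem.Int.toChars, hneg]
      rw [hc, List.foldl_cons,
          if_neg (by decide : ¬(("2468".toList).contains '-' = true)),
          if_neg (by decide : ¬(("13579".toList).contains '-' = true)),
          if_neg (by decide : ¬('-' = '0')),
          pv_foldA, pv_dcLoop_eq _ (by omega)]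
    · have hc : PySem.Int.toChars s = Nat.toDigits 10 s.natAbs := by
        simp [PySem.Int.toChars, hneg]
        congr 1
        omega
      rw [hc, pv_foldA, pv_dcLoop_eq _ (by omega)]
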